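-- pv_equiv track=rewrite | github.com/xtnctx/CPU-Scheduling-Simulator | OS_CPU_Scheduling/fcn.py | to_24hr_format
-- ===== SOURCE A (Python) =====
-- def to_24hr_format(time):
--     half_time = False
--     for i in range(len(time)):
--         a = time[i].split(':')
--         if int(a[0]) == 12:
--             half_time = True
--         if half_time and int(a[0]) < 12:
--             time[i] = f'{int(a[0])+12}:{a[1]}'
--     return time
-- ===== SOURCE B (Python) =====
-- def to_24hr_format(time):
--     # stage 1: parse every hour field once, in order
--     hours = [int(s.split(':')[0]) for s in time]
--     # stage 2: locate the first 12-hour (the am->pm crossing)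
--     if 12 not in hours:
--         return time
--     cut = hours.index(12)
--     # stage 3: rebuild the suffix after the crossing in one comprehension,
--     # splicing it back in place via slice assignment (same list object mutated)
--     time[cut + 1:] = [f'{h + 12}:' + s.split(':')[1] if h < 12 else s
--                       for s, h in zip(time[cut + 1:], hours[cut + 1:])]
--     return time
-- ===== Notes on version B (the rewrite author's own statement) =====
-- stated objective: idiomatic
-- what changed: Replaces A's single stateful loop carrying a boolean flag with three data-parallel stages: a comprehension parsing all hours into a list, hours.index(12) locating the crossing, and a zip-comprehension spliced back with slice assignment rewriting the suffix; no per-element mutable state or index loop remains.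
import Mathlib
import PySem

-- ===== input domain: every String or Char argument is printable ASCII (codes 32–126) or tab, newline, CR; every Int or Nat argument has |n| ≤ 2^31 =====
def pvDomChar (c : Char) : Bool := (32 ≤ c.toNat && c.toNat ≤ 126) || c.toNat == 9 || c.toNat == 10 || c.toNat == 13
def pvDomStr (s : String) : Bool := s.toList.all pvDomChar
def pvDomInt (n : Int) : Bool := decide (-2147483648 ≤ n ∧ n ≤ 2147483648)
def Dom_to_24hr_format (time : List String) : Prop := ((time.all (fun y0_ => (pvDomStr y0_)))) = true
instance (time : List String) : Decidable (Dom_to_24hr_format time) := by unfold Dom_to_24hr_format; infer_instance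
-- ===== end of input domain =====

-- B replaces A's stateful flag loop with three data-parallel stages: map all hours out,
-- hours.index(12) for the crossing, and a zip-comprehension spliced back over the suffix.
-- Both Pythons mutate `time` in place identically; the ports model the returned value.

-- ===== PORT A =====
-- the body of A's single loop (st = (half_time, time), i the loop index)
def pvStepA (st : Bool × List String) (i : Nat) : Bool × List String :=
  let a := (PySem.Str.split? (st.2.getD i "") ":").getD []
  let h := (PySem.Int.ofStr? (a.getD 0 "")).getD 0
  let half := if h = 12 then true else st.1
  if half ∧ h < 12 then
    (half, st.2.set i (PySem.Int.toStr (h + 12) ++ ":" ++ a.getD 1 ""))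
  else (half, st.2)

def to_24hr_format (time : List String) : List String :=
  ((List.range time.length).foldl pvStepA (false, time)).2

-- ===== PORT B =====
-- the hour field int(s.split(':')[0]) of one element (Source B's stage-1 comprehension body)
def pvHour (s : String) : Int := (PySem.Int.ofStr? (((PySem.Str.split? s ":").getD []).getD 0 "")).getD 0

-- f'{h + 12}:' + s.split(':')[1]  (Source B's stage-3 comprehension body, rewrite branch)
def pvRwB (s : String) (h : Int) : String :=
  PySem.Int.toStr (h + 12) ++ ":" ++ (((PySem.Str.split? s ":").getD []).getD 1 "")

def to_24hr_format_alt (time : List String) : List String :=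
  let hours := time.map pvHour
  if (12 : Int) ∈ hours then
    match PySem.List.index? hours 12 with
    | none => time
    | some cut =>
        time.take (cut + 1) ++
          ((time.drop (cut + 1)).zip (hours.drop (cut + 1))).map
            (fun sh => if sh.2 < 12 then pvRwB sh.1 sh.2 else sh.1)
  else time

-- ===== PRECONDITION & SPEC =====
-- the hour field of an element as Python's int() sees it: int of the piece before the
-- first colon; none = ValueError
def pvHourOpt (s : String) : Option Int :=
  PySem.Int.ofChars? ((PySem.Chars.splitOn s.toList [':']).getD 0 [])

-- Pre_ is exactly where A returns: every hour field must parse as an int (else ValueError),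
-- and every element strictly after the first 12-hour element whose own hour is < 12 (i.e.
-- exactly the elements A rewrites) must contain a colon so that a[1] exists (else IndexError).
def Pre_to_24hr_format (time : List String) : Prop :=
  (time.map pvHourOpt).all Option.isSome = true ∧
  (match PySem.List.index? (time.map pvHourOpt) (some 12) with
   | none => true
   | some k => (time.drop (k + 1)).all
       (fun s => !decide ((pvHourOpt s).getD 0 < 12) || s.toList.contains ':')) = true
instance (time : List String) : Decidable (Pre_to_24hr_format time) := by
  unfold Pre_to_24hr_format; infer_instance

def pvWitness_to_24hr_format : List String := []

def Spec_to_24hr_format (time : List String) (out : List String) : Prop := out = to_24hr_format_alt time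
instance (time : List String) (out : List String) : Decidable (Spec_to_24hr_format time out) := by unfold Spec_to_24hr_format; infer_instance

-- ===== CLAIM (what is proved, stated in full; the proofs are below) =====
def Claim_equal_to_24hr_format : Prop := ∀ (time : List String), Dom_to_24hr_format time → Pre_to_24hr_format time → Spec_to_24hr_format time (to_24hr_format time)

-- ===== LEMMAS AND PROOFS =====

-- the rewritten form of an element (pvRwB at its own hour)
def pvRw (s : String) : String := pvRwB s (pvHour s)

-- reference recursion: A's single pass written structurally over the list
def pvGo : Bool → List String → List String
  | _, [] => []
  | half, s :: rest =>
      let half' := if pvHour s = 12 then true else half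
      (if half' ∧ pvHour s < 12 then pvRw s else s) :: pvGo half' rest

def pvFlag : Bool → List String → Bool
  | b, [] => b
  | b, s :: rest => pvFlag (if pvHour s = 12 then true else b) rest

theorem pv_getD_mid (pre suf : List String) (s : String) :
    (pre ++ s :: suf).getD pre.length "" = s := by
  induction pre with
  | nil => rfl
  | cons p ps ih => simp

theorem pv_stepA_mid (pre rest : List String) (s : String) (b : Bool) :
    pvStepA (b, pre ++ s :: rest) pre.length
      = ((if pvHour s = 12 then true else b),
          pre ++ (if (if pvHour s = 12 then true else b) ∧ pvHour s < 12 then pvRw s else s) :: rest) := by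
  unfold pvStepA
  dsimp only
  rw [pv_getD_mid]
  simp only [pvHour, pvRw, pvRwB]
  split_ifs <;> simp_all

theorem pv_foldA (suf : List String) : ∀ (pre : List String) (b : Bool),
    (List.range' pre.length suf.length).foldl pvStepA (b, pre ++ suf)
      = (pvFlag b suf, pre ++ pvGo b suf) := by
  induction suf with
  | nil => intro pre b; simp [pvFlag, pvGo]
  | cons s rest ih =>
    intro pre b
    simp only [List.length_cons]
    rw [List.range'_succ, List.foldl_cons, pv_stepA_mid]
    have key := ih (pre ++ [(if (if pvHour s = 12 then true else b) ∧ pvHour s < 12 then pvRw s else s)])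
      (if pvHour s = 12 then true else b)
    simp only [List.append_assoc, List.singleton_append, List.length_append, List.length_cons,
      List.length_nil, Nat.zero_add] at key
    rw [key]
    simp [pvGo, pvFlag]

theorem pv_A_eq_go (time : List String) : to_24hr_format time = pvGo false time := by
  unfold to_24hr_format
  rw [List.range_eq_range']
  have key := pv_foldA time [] false
  simp only [List.nil_append, List.length_nil] at key
  rw [key]

-- pvGo with the flag already true is exactly Source B's stage-3 zip-comprehension
theorem pv_go_true_eq_zip (t : List String) :
    pvGo true t = (t.zip (t.map pvHour)).map (fun sh => if sh.2 < 12 then pvRwB sh.1 sh.2 else sh.1) := by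
  induction t with
  | nil => rfl
  | cons s rest ih =>
    by_cases h12 : pvHour s = 12
    · simp [pvGo, h12, ih]
    · simp [pvGo, pvRw, h12, ih]

-- a list without a 12-hour element is returned unchanged by A's pass
theorem pv_go_id (l : List String) (h : ∀ u ∈ l, ¬ pvHour u = 12) : pvGo false l = l := by
  induction l with
  | nil => rfl
  | cons s rest ih =>
    have hs : ¬ pvHour s = 12 := h s (by simp)
    simp only [pvGo, hs, if_false]
    simp [ih (fun v hv => h v (by simp [hv]))]

theorem pv_go_skip (p : List String) (s : String) (suf : List String)
    (hp : ∀ u ∈ p, ¬ pvHour u = 12) (hs : pvHour s = 12) :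
    pvGo false (p ++ s :: suf) = p ++ s :: pvGo true suf := by
  induction p with
  | nil => simp [pvGo, hs]
  | cons u p' ih =>
    have hu : ¬ pvHour u = 12 := hp u (by simp)
    simp only [List.cons_append, pvGo, hu, if_false]
    have : pvGo false (p' ++ s :: suf) = p' ++ s :: pvGo true suf :=
      ih (fun v hv => hp v (by simp [hv]))
    simp [this]

theorem pv_B_eq_go (time : List String) : to_24hr_format_alt time = pvGo false time := by
  unfold to_24hr_format_alt
  by_cases hmem : (12 : Int) ∈ time.map pvHour
  · simp only [hmem, if_true]
    cases hfind : PySem.List.index? (time.map pvHour) 12 with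
    | none =>
      rw [PySem.List.index?_eq_none_iff] at hfind
      exact absurd hmem hfind
    | some cut =>
      rw [PySem.List.index?_eq_some_iff] at hfind
      obtain ⟨hpre, hsuf, heq, hlen, hnotin⟩ := hfind
      obtain ⟨p, rest, htime, hmapp, hmaprest⟩ := List.map_eq_append_iff.mp heq
      cases rest with
      | nil => simp at hmaprest
      | cons s t =>
        obtain ⟨hhs, hmapt⟩ := by simpa using hmaprest
        subst htime
        have hplen : p.length = cut := by
          have := congrArg List.length hmapp; simpa [hlen] using this
        have hp12 : ∀ u ∈ p, ¬ pvHour u = 12 := by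
          intro u hu h12
          exact hnotin (hmapp ▸ (h12 ▸ List.mem_map_of_mem hu))
        rw [pv_go_skip p s t hp12 hhs]
        have htake : (p ++ s :: t).take (cut + 1) = p ++ [s] := by
          rw [← hplen]; simp [List.take_append]
        have hdrop : (p ++ s :: t).drop (cut + 1) = t := by
          rw [← hplen]; simp [List.drop_append]
        have hdrop' : (List.map pvHour (p ++ s :: t)).drop (cut + 1) = t.map pvHour := by
          have : (List.map pvHour (p ++ s :: t)).drop (cut + 1)
              = List.map pvHour ((p ++ s :: t).drop (cut + 1)) := by
            rw [List.map_drop]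
          rw [this, hdrop]
        simp only [htake, hdrop, hdrop', ← pv_go_true_eq_zip]
        simp
  · simp only [hmem, if_false]
    refine (pv_go_id time ?_).symm
    intro u hu h12
    exact hmem (h12 ▸ List.mem_map_of_mem hu)

-- ===== VERDICT (by name: the statement is the Claim_ definition above) =====
theorem to_24hr_format_spec : Claim_equal_to_24hr_format := by
  intro time _ _
  unfold Spec_to_24hr_format
  rw [pv_A_eq_go, pv_B_eq_go]
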